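-- pv_equiv track=rewrite | github.com/dongwoo46/TIL | algorithm/SWEA/view.py | open_window
-- ===== SOURCE A (Python) =====
-- def open_window(arr):
--     window = [0,0]
--     count = []
--
--     for i in range(2,len(arr)-2):
--         if arr[i] == max(arr[i - 2:i + 3]):
--             window.append(sorted(arr[i-2:i+3],reverse=True)[1])
--         else:
--             window.append(max(arr[i - 2:i + 3]))
--
--     window.append(0)
--     window.append(0)
--
--     for j in range(2,len(arr)-2):
--         if arr[j]>window[j]:
--             count.append(arr[j]-window[j])
--         else:
--             continue
--     total = sum(count)
--
--     return total
-- ===== SOURCE B (Python) =====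
-- def open_window(arr):
--     total = 0
--     for i in range(2, len(arr) - 2):
--         neighbor = max(arr[i-2], arr[i-1], arr[i+1], arr[i+2])
--         total += max(0, arr[i] - neighbor)
--     return total
-- ===== Notes on version B (the rewrite author's own statement) =====
-- stated objective: simpler
-- what changed: Replaced A's two passes (building an intermediate 'window' list of per-position view heights with a self-inclusive slice max and a sorted-second-max tie case, then re-scanning it) by one loop that takes the max of the four neighbours excluding the building itself and adds max(0, arr[i]-neighbor) to a running total.
import Mathlib
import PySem

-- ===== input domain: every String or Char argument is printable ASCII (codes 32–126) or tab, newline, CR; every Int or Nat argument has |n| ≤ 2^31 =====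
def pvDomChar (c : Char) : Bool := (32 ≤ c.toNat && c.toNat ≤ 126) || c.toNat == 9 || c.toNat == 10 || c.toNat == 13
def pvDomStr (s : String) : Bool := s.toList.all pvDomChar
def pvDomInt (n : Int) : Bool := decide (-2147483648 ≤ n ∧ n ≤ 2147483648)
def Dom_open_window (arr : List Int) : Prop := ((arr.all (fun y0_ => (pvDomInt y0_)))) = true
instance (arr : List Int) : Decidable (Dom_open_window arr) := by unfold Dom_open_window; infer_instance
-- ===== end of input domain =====

-- B folds A's two passes (window list with self-inclusive slice max / sorted second-max tie case, then a rescan)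
-- into one loop over the exclude-self max of the four neighbours; objective: simpler, same asymptotic cost.


-- ===== PORT A =====
-- arr[i] ; every call site below has the index provably in range, so the default is never consulted
def pyVal (arr : List Int) (i : Int) : Int := (PySem.List.pyGet? arr i).getD 0
-- max(l) ; callers pass a nonempty slice (5 elements), so the default is never consulted
def pvMax (l : List Int) : Int := (PySem.List.max? l (fun y => y)).getD 0
-- sorted(l, reverse=True)[1] ; callers pass a 5-element slice, so index 1 is in range
def pvSecond (l : List Int) : Int := (PySem.List.pyGet? (PySem.List.sorted l (fun y => y) true) 1).getD 0

def open_window (arr : List Int) : Int :=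
  let n : Int := arr.length
  let window : List Int :=
    (PySem.List.pyRange 2 (n - 2) 1).foldl (fun w i =>
      if pyVal arr i = pvMax (PySem.List.slice arr (some (i - 2)) (some (i + 3))) then
        w ++ [pvSecond (PySem.List.slice arr (some (i - 2)) (some (i + 3)))]
      else
        w ++ [pvMax (PySem.List.slice arr (some (i - 2)) (some (i + 3)))]) [0, 0]
  let window := window ++ [0]
  let window := window ++ [0]
  let count : List Int :=
    (PySem.List.pyRange 2 (n - 2) 1).foldl (fun c j =>
      if pyVal arr j > pyVal window j then
        c ++ [pyVal arr j - pyVal window j]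
      else c) []
  count.sum

-- ===== PORT B =====
def open_window_alt (arr : List Int) : Int :=
  (PySem.List.pyRange 2 ((arr.length : Int) - 2) 1).foldl (fun total i =>
    let neighbor := max (max (max (pyVal arr (i - 2)) (pyVal arr (i - 1))) (pyVal arr (i + 1))) (pyVal arr (i + 2))
    total + max 0 (pyVal arr i - neighbor)) 0

-- ===== PRECONDITION & SPEC =====
def Spec_open_window (arr : List Int) (out : Int) : Prop := out = open_window_alt arr
instance (arr : List Int) (out : Int) : Decidable (Spec_open_window arr out) := by unfold Spec_open_window; infer_instance

-- ===== CLAIM (what is proved, stated in full; the proofs are below) =====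
def Claim_equal_open_window : Prop := ∀ (arr : List Int), Dom_open_window arr → Spec_open_window arr (open_window arr)

-- ===== LEMMAS AND PROOFS =====

-- window value A computes for position i (proof-side name for the fold's appended element)
def pvW (arr : List Int) (i : Int) : Int :=
  if pyVal arr i = pvMax (PySem.List.slice arr (some (i - 2)) (some (i + 3))) then
    pvSecond (PySem.List.slice arr (some (i - 2)) (some (i + 3)))
  else
    pvMax (PySem.List.slice arr (some (i - 2)) (some (i + 3)))

theorem pvTake5 (l : List Int) (m : Nat) (h : m + 4 < l.length) :
    (l.drop m).take 5 = [l[m], l[m+1]'(by omega), l[m+2]'(by omega), l[m+3]'(by omega), l[m+4]'(by omega)] := by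
  rw [List.drop_eq_getElem_cons (show m < l.length by omega)]
  rw [List.drop_eq_getElem_cons (show m+1 < l.length by omega)]
  rw [List.drop_eq_getElem_cons (show m+1+1 < l.length by omega)]
  rw [List.drop_eq_getElem_cons (show m+1+1+1 < l.length by omega)]
  rw [List.drop_eq_getElem_cons (show m+1+1+1+1 < l.length by omega)]
  rfl

theorem pvMax5 (a b c d e : Int) :
    pvMax [a,b,c,d,e] = max (max (max (max a b) c) d) e := by
  rw [pvMax, PySem.List.max?_id_cons]
  simp [List.foldl]

theorem pv_second_strict (a b c d e : Int) (ha : a < c) (hb : b < c) (hd : d < c) (he : e < c) :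
    pvSecond [a,b,c,d,e] = max (max (max a b) d) e := by
  rcases hseq : PySem.List.sorted [a,b,c,d,e] (fun y => y) true with _ | ⟨x0, tl⟩
  · exact absurd ((PySem.List.sorted_eq_nil_iff _ _ _).mp hseq) (by simp)
  rcases tl with _ | ⟨x1, t⟩
  · have hl := congrArg List.length hseq
    rw [PySem.List.length_sorted] at hl; simp at hl
  have hhead := PySem.List.key_head_sorted_rev_ge _ _ hseq
  have hperm : (x0 :: x1 :: t).Perm [a,b,c,d,e] := by
    rw [← hseq]; exact PySem.List.sorted_perm _ _ _
  have hx0mem : x0 ∈ [a,b,c,d,e] := hperm.mem_iff.mp (by simp)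
  have hx0 : x0 = c := by
    have h1 := hhead c (by simp)
    simp at hx0mem
    omega
  rw [hx0] at hseq hperm hhead
  have hcount : List.count c [a,b,c,d,e] = 1 := by
    simp [ha.ne, hb.ne, hd.ne, he.ne]
  have hc2 : List.count c (x1 :: t) = 0 := by
    have := hperm.count_eq c
    rw [List.count_cons_self] at this
    omega
  have hcnot : c ∉ x1 :: t := List.count_eq_zero.mp hc2
  have hpw : (c :: x1 :: t).Pairwise (fun p q => q ≤ p) := by
    rw [← hseq]; exact PySem.List.sorted_pairwise_rev _ _
  have htail : ∀ y ∈ x1 :: t, y ≤ x1 := by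
    rcases (List.pairwise_cons.mp hpw).2 with h'
    intro y hy
    rcases List.mem_cons.mp hy with rfl | hy'
    · exact le_refl _
    · exact (List.pairwise_cons.mp h').1 y hy'
  have hmem : ∀ y, y ∈ ([a,b,c,d,e] : List Int) → y ≠ c → y ≤ x1 := by
    intro y hy hne
    have : y ∈ c :: x1 :: t := hperm.mem_iff.mpr hy
    rcases List.mem_cons.mp this with rfl | h'
    · exact absurd rfl hne
    · exact htail y h'
  have hax := hmem a (by simp) ha.ne
  have hbx := hmem b (by simp) hb.ne
  have hdx := hmem d (by simp) hd.ne
  have hex := hmem e (by simp) he.ne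
  have hx1mem : x1 ∈ [a,b,c,d,e] := hperm.mem_iff.mp (by simp)
  have hx1ne : x1 ≠ c := fun h => hcnot (h ▸ List.mem_cons_self)
  have hx1 : x1 = max (max (max a b) d) e := by
    simp at hx1mem
    rcases hx1mem with rfl | rfl | rfl | rfl | rfl
    · omega
    · omega
    · exact absurd rfl hx1ne
    · omega
    · omega
  rw [pvSecond, hseq]
  simp [PySem.List.pyGet?, PySem.List.pyIdx?, hx1]

theorem pv_second_tie (a b c d e : Int) (ha : a ≤ c) (hb : b ≤ c) (hd : d ≤ c) (he : e ≤ c)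
    (htie : c = a ∨ c = b ∨ c = d ∨ c = e) : pvSecond [a,b,c,d,e] = c := by
  rcases hseq : PySem.List.sorted [a,b,c,d,e] (fun y => y) true with _ | ⟨x0, tl⟩
  · exact absurd ((PySem.List.sorted_eq_nil_iff _ _ _).mp hseq) (by simp)
  rcases tl with _ | ⟨x1, t⟩
  · have hl := congrArg List.length hseq
    rw [PySem.List.length_sorted] at hl; simp at hl
  have hhead := PySem.List.key_head_sorted_rev_ge _ _ hseq
  have hperm : (x0 :: x1 :: t).Perm [a,b,c,d,e] := by
    rw [← hseq]; exact PySem.List.sorted_perm _ _ _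
  have hx0mem : x0 ∈ [a,b,c,d,e] := hperm.mem_iff.mp (by simp)
  have hx0 : x0 = c := by
    have h1 := hhead c (by simp)
    simp at hx0mem
    omega
  rw [hx0] at hseq hperm hhead
  have hcount : 2 ≤ List.count c [a,b,c,d,e] := by
    rcases htie with rfl | rfl | rfl | rfl <;> simp [List.count_cons] <;> omega
  have hc2 : 1 ≤ List.count c (x1 :: t) := by
    have := hperm.count_eq c
    rw [List.count_cons_self] at this
    omega
  have hcin : c ∈ x1 :: t := List.count_pos_iff.mp (by omega)
  have hpw : (c :: x1 :: t).Pairwise (fun p q => q ≤ p) := by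
    rw [← hseq]; exact PySem.List.sorted_pairwise_rev _ _
  have htail : ∀ y ∈ x1 :: t, y ≤ x1 := by
    rcases (List.pairwise_cons.mp hpw).2 with h'
    intro y hy
    rcases List.mem_cons.mp hy with rfl | hy'
    · exact le_refl _
    · exact (List.pairwise_cons.mp h').1 y hy'
  have hcx1 : c ≤ x1 := htail c hcin
  have hx1mem : x1 ∈ [a,b,c,d,e] := hperm.mem_iff.mp (by simp)
  have hx1c : x1 ≤ c := by simp at hx1mem; omega
  have hx1 : x1 = c := le_antisymm hx1c hcx1
  rw [pvSecond, hseq]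
  simp [PySem.List.pyGet?, PySem.List.pyIdx?, hx1]

theorem pvVal_eq (arr : List Int) (i : Int) (k : Nat) (hik : i.toNat = k) (h0 : 0 ≤ i) (h : k < arr.length) :
    pyVal arr i = arr[k]'h := by
  subst hik
  rw [pyVal, PySem.List.pyGet?_eq_some_getElem arr h0 (by omega)]
  rfl

theorem pvSlice5 (arr : List Int) (k : Nat) (h2 : 2 ≤ k) (h : k + 2 < arr.length) :
    PySem.List.slice arr (some ((k : Int) - 2)) (some ((k : Int) + 3)) =
      [arr[k-2]'(by omega), arr[k-1]'(by omega), arr[k]'(by omega), arr[k+1]'(by omega), arr[k+2]'(by omega)] := by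
  rw [PySem.List.slice_toNat arr (by omega) (by omega)]
  rw [show ((k : Int) - 2).toNat = k - 2 by omega, show ((k : Int) + 3).toNat = k + 3 by omega]
  rw [show k + 3 - (k - 2) = 5 by omega]
  rw [pvTake5 arr (k - 2) (by omega)]
  simp only [show k - 2 + 1 = k - 1 by omega, show k - 2 + 2 = k by omega,
    show k - 2 + 3 = k + 1 by omega, show k - 2 + 4 = k + 2 by omega]

-- the per-position arithmetic heart: A's window value versus B's exclude-self neighbour max
theorem pv_key (A B C D E : Int) :
    (if C > (if C = max (max (max (max A B) C) D) E
             then pvSecond [A,B,C,D,E]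
             else max (max (max (max A B) C) D) E)
     then C - (if C = max (max (max (max A B) C) D) E
             then pvSecond [A,B,C,D,E]
             else max (max (max (max A B) C) D) E)
     else 0)
      = max 0 (C - max (max (max A B) D) E) := by
  by_cases h1 : C = max (max (max (max A B) C) D) E
  · rw [if_pos h1]
    by_cases h2 : max (max (max A B) D) E < C
    · rw [pv_second_strict A B C D E (by omega) (by omega) (by omega) (by omega)]
      split_ifs <;> omega
    · rw [pv_second_tie A B C D E (by omega) (by omega) (by omega) (by omega) (by omega)]
      split_ifs <;> omega
  · rw [if_neg h1]
    split_ifs <;> omega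

theorem pv_point (arr : List Int) (j : Int) (h2 : 2 ≤ j) (hj : j < (arr.length : Int) - 2) :
    (if pyVal arr j > pvW arr j then pyVal arr j - pvW arr j else 0)
      = max 0 (pyVal arr j -
          max (max (max (pyVal arr (j - 2)) (pyVal arr (j - 1))) (pyVal arr (j + 1))) (pyVal arr (j + 2))) := by
  have hjk : ((j.toNat : Int)) = j := Int.toNat_of_nonneg (by omega)
  rw [← hjk] at hj ⊢
  set k := j.toNat with hkdef
  have hk2 : 2 ≤ k := by omega
  have hklen : k + 2 < arr.length := by omega
  rw [pvW, pvSlice5 arr k hk2 hklen, pvMax5]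
  rw [pvVal_eq arr ((k : Int) - 2) (k - 2) (by omega) (by omega) (by omega)]
  rw [pvVal_eq arr ((k : Int) - 1) (k - 1) (by omega) (by omega) (by omega)]
  rw [pvVal_eq arr ((k : Int)) k (by omega) (by omega) (by omega)]
  rw [pvVal_eq arr ((k : Int) + 1) (k + 1) (by omega) (by omega) (by omega)]
  rw [pvVal_eq arr ((k : Int) + 2) (k + 2) (by omega) (by omega) (by omega)]
  exact pv_key _ _ _ _ _

theorem pvWindow_get (arr : List Int) (f : Int → Int) (j : Int) (h2 : 2 ≤ j)
    (hj : j < (arr.length : Int) - 2) :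
    pyVal ((([0, 0] ++ (PySem.List.pyRange 2 ((arr.length : Int) - 2) 1).map f) ++ [0]) ++ [0]) j = f j := by
  have hjk : ((j.toNat : Int)) = j := Int.toNat_of_nonneg (by omega)
  have hrlen : ((PySem.List.pyRange 2 ((arr.length : Int) - 2) 1).map f).length = arr.length - 4 := by
    rw [List.length_map, PySem.List.length_pyRange_one]; omega
  rw [pyVal, PySem.List.pyGet?_of_nonneg _ (by omega)]
  rw [List.getElem?_append_left (by simp [hrlen]; omega)]
  rw [List.getElem?_append_left (by simp [hrlen]; omega)]
  rw [List.getElem?_append_right (by simp; omega)]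
  rw [List.getElem?_map, PySem.List.getElem?_pyRange_one]
  rw [if_pos (by simp; omega)]
  simp only [Option.map_some, Option.getD_some]
  congr 1
  simp
  omega

theorem pvSum_filter_map (l : List Int) (q : Int → Prop) [DecidablePred q] (f : Int → Int) :
    ((l.filter (fun x => decide (q x))).map f).sum = (l.map (fun x => if q x then f x else 0)).sum := by
  induction l with
  | nil => rfl
  | cons x xs ih =>
    by_cases h : q x <;> simp [h, ih]

-- ===== VERDICT (by name: the statement is the Claim_ definition above) =====
theorem open_window_spec : Claim_equal_open_window := by
  intro arr _
  unfold Spec_open_window open_window open_window_alt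
  simp only []
  have hwin :
      (PySem.List.pyRange 2 ((arr.length : Int) - 2) 1).foldl (fun w i =>
        if pyVal arr i = pvMax (PySem.List.slice arr (some (i - 2)) (some (i + 3))) then
          w ++ [pvSecond (PySem.List.slice arr (some (i - 2)) (some (i + 3)))]
        else
          w ++ [pvMax (PySem.List.slice arr (some (i - 2)) (some (i + 3)))]) [0, 0]
        = [0, 0] ++ (PySem.List.pyRange 2 ((arr.length : Int) - 2) 1).map (pvW arr) := by
    rw [PySem.List.foldl_congr_mem _ _ (fun w i => w ++ [pvW arr i]) _ (by
      intro acc x _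
      by_cases h : pyVal arr x = pvMax (PySem.List.slice arr (some (x - 2)) (some (x + 3))) <;>
        simp [pvW, h])]
    exact PySem.List.foldl_append_singleton_eq_map _ _ _
  rw [hwin]
  rw [PySem.List.foldl_append_ite]
  rw [List.nil_append]
  rw [PySem.List.foldl_add]
  rw [zero_add]
  rw [pvSum_filter_map]
  apply congrArg List.sum
  apply List.map_congr_left
  intro j hjmem
  rw [PySem.List.mem_pyRange_one] at hjmem
  rw [pvWindow_get arr (pvW arr) j hjmem.1 hjmem.2]
  exact pv_point arr j hjmem.1 hjmem.2
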